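-- pv_equiv track=rewrite | github.com/1ce2k/iti0102-2023 | TK/tk3/exam.py | mirror_ends
-- ===== SOURCE A (Python) =====
-- def mirror_ends(s: str) -> str:
--     """
--     Given a string, look for a mirror image (backwards) string at both the beginning and end of the given string.
--
--     In other words, zero or more characters at the very beginning of the given string,
--     and at the very end of the string in reverse order (possibly overlapping).
--
--     For example, the string "abXYZba" has the mirror end "ab".
--
--     mirror_ends("abXYZba") → "ab"
--     mirror_ends("abca") → "a"
--     mirror_ends("aba") → "aba"
--
--     :param s: String
--     :return: Mirror image string
--     """
--     mirror_start = ''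
--     mirror_end = ''
--     for i in range(len(s)):
--         if s[:i + 1] == s[-1:-i - 2:-1]:
--             mirror_end = s[:i + 1]
--             mirror_start = s[-1:-i - 2: -1]
--     return mirror_start if mirror_start == mirror_end else ""
-- ===== SOURCE B (Python) =====
-- def mirror_ends(s: str) -> str:
--     n = len(s)
--     j = 0
--     while j < n and s[j] == s[n - 1 - j]:
--         j += 1
--     return s[:j]
-- ===== Notes on version B (the rewrite author's own statement) =====
-- stated objective: faster
-- what changed: Replaces the quadratic loop that re-slices and compares whole prefix/reversed-suffix pairs at every index with a single O(n) pass comparing s[j] to s[n-1-j] and stopping at the first mismatch (the prefix/suffix match is monotone, so the longest match is the run up to the first mismatch).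
import Mathlib
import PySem

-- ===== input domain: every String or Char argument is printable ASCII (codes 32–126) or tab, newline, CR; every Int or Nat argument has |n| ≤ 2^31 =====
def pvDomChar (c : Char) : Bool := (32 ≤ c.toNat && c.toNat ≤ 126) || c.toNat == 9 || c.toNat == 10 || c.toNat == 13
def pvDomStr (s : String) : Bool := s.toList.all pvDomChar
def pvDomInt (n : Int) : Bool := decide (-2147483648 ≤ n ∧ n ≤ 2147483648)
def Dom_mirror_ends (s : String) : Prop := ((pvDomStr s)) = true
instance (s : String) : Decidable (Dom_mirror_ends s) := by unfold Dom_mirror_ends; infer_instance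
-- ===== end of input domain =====

-- B replaces A's quadratic re-slicing loop with one left-to-right pass comparing
-- s[j] with s[n-1-j] that stops at the first mismatch (objective: faster, O(n) vs O(n^2)).

-- ===== PORT A =====
-- literal port: for i in range(len(s)): if s[:i+1] == s[-1:-i-2:-1] keep the pair;
-- step -1 slice? never returns none, so .getD [] is exact here.
def mirror_ends (s : String) : String :=
  let cs := s.toList
  let r := (PySem.List.pyRange 0 cs.length 1).foldl
    (fun (st : List Char × List Char) (i : Int) =>
      if PySem.List.slice cs none (some (i + 1))
          = (PySem.List.slice? cs (some (-1)) (some (-i - 2)) (-1)).getD [] then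
        ((PySem.List.slice? cs (some (-1)) (some (-i - 2)) (-1)).getD [],
         PySem.List.slice cs none (some (i + 1)))
      else st)
    ([], [])
  if r.1 = r.2 then String.ofList r.1 else ""

-- ===== PORT B =====
-- the while loop of Source B: advance j while j < n and s[j] == s[n-1-j]
def mirrorCount (cs : List Char) (n j : Nat) : Nat :=
  if _h : j < n then
    if cs.getD j default = cs.getD (n - 1 - j) default then mirrorCount cs n (j + 1) else j
  else j
termination_by n - j

def mirror_ends_alt (s : String) : String :=
  let cs := s.toList
  String.ofList (cs.take (mirrorCount cs cs.length 0))

-- ===== PRECONDITION & SPEC =====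
def Spec_mirror_ends (s : String) (out : String) : Prop := out = mirror_ends_alt s
instance (s : String) (out : String) : Decidable (Spec_mirror_ends s out) := by unfold Spec_mirror_ends; infer_instance

-- ===== CLAIM (what is proved, stated in full; the proofs are below) =====
def Claim_equal_mirror_ends : Prop := ∀ (s : String), Dom_mirror_ends s → Spec_mirror_ends s (mirror_ends s)

-- ===== LEMMAS AND PROOFS =====

-- the step -1 slice s[-1:-i-2:-1] is the reverse of the last i+1 characters
lemma slice_neg_rev (cs : List Char) (i : Nat) (hi : i < cs.length) :
    PySem.List.slice? cs (some (-(1 : Int))) (some (-(i : Int) - 2)) (-1)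
      = some ((cs.drop (cs.length - (i + 1))).reverse) := by
  unfold PySem.List.slice? PySem.List.sliceIndices
  norm_num
  have hcnt : (if 1 + max (-(i:Int) - 2 + (cs.length:Int)) (-1) < (cs.length:Int) then
          (-1 + (cs.length:Int) - max (-(i:Int) - 2 + (cs.length:Int)) (-1)).toNat else 0) = i + 1 := by
    rw [if_pos (by omega)]; omega
  rw [hcnt]
  have hsome : ∀ x ∈ List.range (i+1),
      cs[(-1 + (cs.length:Int) + -(x:Int)).toNat]? = some (cs.getD (cs.length - 1 - x) default) := by
    intro x hx
    rw [List.mem_range] at hx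
    have ht : (-1 + (cs.length:Int) + -(x:Int)).toNat = cs.length - 1 - x := by omega
    rw [ht, List.getElem?_eq_getElem (by omega), List.getD_eq_getElem _ _ (by omega)]
  rw [List.filterMap_congr hsome]
  rw [show (fun x => some (cs.getD (cs.length - 1 - x) default))
        = some ∘ (fun x => cs.getD (cs.length - 1 - x) default) from rfl, List.filterMap_eq_map]
  apply List.ext_getElem
  · simp; omega
  · intro k h1 h2
    have hk : k < i + 1 := by simpa using h1
    simp only [List.getElem_map, List.getElem_range, List.getElem_reverse, List.getElem_drop,
      List.length_drop]
    rw [List.getD_eq_getElem _ _ (by omega)]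
    congr 1
    omega

-- the prefix/suffix comparison at index i is monotone: it holds iff all j ≤ i match
lemma cond_iff (cs : List Char) (i : Nat) (hi : i < cs.length) :
    (cs.take (i + 1) = (cs.drop (cs.length - (i + 1))).reverse)
      ↔ (∀ j, j ≤ i → cs.getD j default = cs.getD (cs.length - 1 - j) default) := by
  have hrev : ∀ (j : Nat) (hj : j ≤ i), ((cs.drop (cs.length - (i + 1))).reverse)[j]'(by simp; omega)
      = cs[cs.length - 1 - j]'(by omega) := by
    intro j hj
    rw [List.getElem_reverse, List.getElem_drop]
    congr 1
    simp only [List.length_drop]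
    omega
  constructor
  · intro h j hj
    have hj' : j < (cs.take (i + 1)).length := by simp; omega
    have he := List.getElem_of_eq h hj'
    rw [List.getElem_take, hrev j hj] at he
    rw [List.getD_eq_getElem _ _ (by omega), List.getD_eq_getElem _ _ (by omega)]
    exact he
  · intro h
    apply List.ext_getElem
    · simp; omega
    · intro k h1 h2
      have hk : k ≤ i := by simp at h1; omega
      rw [List.getElem_take, hrev k hk]
      have := h k hk
      rwa [List.getD_eq_getElem _ _ (by omega), List.getD_eq_getElem _ _ (by omega)] at this

-- characterization of B's loop result
lemma mirrorCount_spec (cs : List Char) (n j : Nat) (hj : j ≤ n) :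
    j ≤ mirrorCount cs n j ∧ mirrorCount cs n j ≤ n
      ∧ (∀ k, j ≤ k → k < mirrorCount cs n j → cs.getD k default = cs.getD (n - 1 - k) default)
      ∧ (mirrorCount cs n j < n →
          cs.getD (mirrorCount cs n j) default ≠ cs.getD (n - 1 - mirrorCount cs n j) default) := by
  induction hfu : n - j using Nat.strong_induction_on generalizing j with
  | _ fuel ih =>
    rw [mirrorCount]
    by_cases h : j < n
    · simp only [h, dif_pos]
      by_cases hm : cs.getD j default = cs.getD (n - 1 - j) default
      · simp only [hm, if_pos]
        obtain ⟨h1, h2, h3, h4⟩ := ih (n - (j+1)) (by omega) (j+1) h rfl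
        refine ⟨by omega, h2, ?_, h4⟩
        intro k hk1 hk2
        rcases Nat.eq_or_lt_of_le hk1 with rfl | hlt
        · exact hm
        · exact h3 k hlt hk2
      · simp only [hm, if_neg, not_false_iff]
        exact ⟨le_rfl, by omega, by omega, fun _ => hm⟩
    · simp only [h, dif_neg, not_false_iff]
      exact ⟨le_rfl, by omega, by omega, fun hc => hc.elim⟩

-- fold invariant for A's loop
lemma foldA (cs : List Char) (k : Nat) (hk : k ≤ cs.length) :
    (PySem.List.pyRange 0 k 1).foldl
      (fun (st : List Char × List Char) (i : Int) =>
        if PySem.List.slice cs none (some (i + 1))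
            = (PySem.List.slice? cs (some (-1)) (some (-i - 2)) (-1)).getD [] then
          ((PySem.List.slice? cs (some (-1)) (some (-i - 2)) (-1)).getD [],
           PySem.List.slice cs none (some (i + 1)))
        else st)
      ([], [])
      = (cs.take (min k (mirrorCount cs cs.length 0)),
         cs.take (min k (mirrorCount cs cs.length 0))) := by
  induction k with
  | zero => simp [PySem.List.pyRange_one_eq_nil]
  | succ k ih =>
    obtain ⟨hb0, hbn, hmatch, hmis⟩ := mirrorCount_spec cs cs.length 0 (Nat.zero_le _)
    set b := mirrorCount cs cs.length 0 with hbdef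
    have hk' : k < cs.length := hk
    rw [show ((k + 1 : Nat) : Int) = (k : Int) + 1 by push_cast; ring,
      PySem.List.pyRange_one_succ_right (by positivity), List.foldl_append]
    rw [ih (by omega)]
    simp only [List.foldl_cons, List.foldl_nil]
    have hpre : PySem.List.slice cs none (some ((k : Int) + 1)) = cs.take (k + 1) := by
      rw [show ((k : Int) + 1) = ((k + 1 : Nat) : Int) by push_cast; ring,
        PySem.List.slice_to_natCast]
    have hsuf := slice_neg_rev cs k hk'
    by_cases hkb : k < b
    · have hcond : cs.take (k + 1) = (cs.drop (cs.length - (k + 1))).reverse := by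
        rw [cond_iff cs k hk']
        intro j hj
        exact hmatch j (Nat.zero_le _) (by omega)
      rw [hpre, hsuf]
      simp only [Option.getD_some]
      rw [if_pos hcond, ← hcond]
      have : min (k + 1) b = k + 1 := by omega
      rw [this]
    · have hcond : ¬ (cs.take (k + 1) = (cs.drop (cs.length - (k + 1))).reverse) := by
        rw [cond_iff cs k hk']
        intro hall
        have hbn' : b < cs.length := by omega
        exact hmis hbn' (hall b (by omega))
      rw [hpre, hsuf]
      simp only [Option.getD_some]
      rw [if_neg hcond]
      have : min (k + 1) b = min k b := by omega
      rw [this]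

-- ===== VERDICT (by name: the statement is the Claim_ definition above) =====
theorem mirror_ends_spec : Claim_equal_mirror_ends := by
  intro s _
  unfold Spec_mirror_ends mirror_ends mirror_ends_alt
  simp only [foldA s.toList s.toList.length le_rfl,
    Nat.min_eq_right (mirrorCount_spec s.toList s.toList.length 0 (Nat.zero_le _)).2.1,
    if_true]
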